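-- pv_equiv track=rewrite | github.com/dai22rosso/RNA | find_k.py | separate_array_by_index
-- ===== SOURCE A (Python) =====
-- def separate_array_by_index(arr, index_array):
--     grouped_elements = {}
--     for i, index in enumerate(index_array):
--         if index not in grouped_elements:
--             grouped_elements[index] = []
--         grouped_elements[index].append(arr[i])
--
--     # Convert the dictionary values to a list of lists
--     separated_arrays = list(grouped_elements.values())
--     return separated_arrays
-- ===== SOURCE B (Python) =====
-- def separate_array_by_index(arr, index_array):
--     pairs = list(zip(index_array, arr))
--     keys = list(dict.fromkeys(k for k, _ in pairs))
--     return [[v for k2, v in pairs if k2 == k] for k in keys]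
-- ===== Notes on version B (the rewrite author's own statement) =====
-- stated objective: idiomatic
-- what changed: B replaces A's single dict-accumulating pass with a keys-first group-by: dedup the index values in first-seen order (dict.fromkeys) and build each group by one filtering scan per key.
import Mathlib
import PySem

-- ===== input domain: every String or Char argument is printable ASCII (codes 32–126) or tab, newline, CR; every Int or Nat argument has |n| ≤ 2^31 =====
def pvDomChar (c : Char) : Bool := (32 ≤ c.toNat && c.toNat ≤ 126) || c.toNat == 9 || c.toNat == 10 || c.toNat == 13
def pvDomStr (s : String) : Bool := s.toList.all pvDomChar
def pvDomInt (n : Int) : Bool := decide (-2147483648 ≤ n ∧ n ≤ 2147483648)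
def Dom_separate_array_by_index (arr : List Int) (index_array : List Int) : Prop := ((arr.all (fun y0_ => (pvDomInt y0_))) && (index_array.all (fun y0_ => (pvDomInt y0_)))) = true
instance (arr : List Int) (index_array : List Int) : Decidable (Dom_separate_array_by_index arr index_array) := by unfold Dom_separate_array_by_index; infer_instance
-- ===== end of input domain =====

-- B groups by first-seen keys via ordered dedup + one filtering scan per key instead of A's
-- accumulating dict pass (objective: idiomatic); return values agree whenever A returns.

-- ===== PORT A =====
-- A's loop step: if index not in grouped_elements: grouped_elements[index] = [];
-- grouped_elements[index].append(arr[i]).  arr[i] is ported with pyGet?; the .getD 0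
-- default is never reached inside Pre_ (i < len arr there; Python raises outside Pre_).
def sepStepA (arr : List Int) (d : PySem.Dict Int (List Int)) (p : Int × Int) : PySem.Dict Int (List Int) :=
  let d' := if d.contains p.2 then d else d.insert p.2 []
  d'.insert p.2 (d'.getD p.2 [] ++ [(PySem.List.pyGet? arr p.1).getD 0])

def separate_array_by_index (arr : List Int) (index_array : List Int) : List (List Int) :=
  ((PySem.List.enumerate index_array 0).foldl (sepStepA arr) PySem.Dict.empty).values

-- ===== PORT B =====
def separate_array_by_index_alt (arr : List Int) (index_array : List Int) : List (List Int) :=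
  let pairs := index_array.zip arr
  (PySem.List.dedup (pairs.map (·.1))).map
    (fun k => ((index_array.zip arr).filter (fun p => p.1 == k)).map (·.2))

-- ===== PRECONDITION & SPEC =====
-- Pre_ excludes exactly the inputs where A raises IndexError (index_array longer than arr).
def Pre_separate_array_by_index (arr : List Int) (index_array : List Int) : Prop :=
  index_array.length ≤ arr.length
instance (arr : List Int) (index_array : List Int) : Decidable (Pre_separate_array_by_index arr index_array) := by unfold Pre_separate_array_by_index; infer_instance
def pvWitness_separate_array_by_index : List Int × List Int := ([10, 20, 30], [1, 2, 1])

def Spec_separate_array_by_index (arr : List Int) (index_array : List Int) (out : List (List Int)) : Prop := out = separate_array_by_index_alt arr index_array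
instance (arr : List Int) (index_array : List Int) (out : List (List Int)) : Decidable (Spec_separate_array_by_index arr index_array out) := by unfold Spec_separate_array_by_index; infer_instance

-- ===== CLAIM (what is proved, stated in full; the proofs are below) =====
def Claim_equal_separate_array_by_index : Prop := ∀ (arr : List Int) (index_array : List Int), Dom_separate_array_by_index arr index_array → Pre_separate_array_by_index arr index_array → Spec_separate_array_by_index arr index_array (separate_array_by_index arr index_array)

-- ===== LEMMAS AND PROOFS =====

-- A's step equals one Dict.modify.
theorem sepStepA_eq_modify (arr : List Int) (d : PySem.Dict Int (List Int)) (p : Int × Int) :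
    sepStepA arr d p
      = d.modify p.2 [] (fun l => l ++ [(PySem.List.pyGet? arr p.1).getD 0]) := by
  unfold sepStepA
  by_cases h : d.contains p.2 = true
  · simp [h, PySem.Dict.modify]
  · have hc : d.contains p.2 = false := by simpa using h
    have hf : d.getD p.2 [] = [] := PySem.Dict.getD_of_not_contains d [] hc
    simp [h, PySem.Dict.modify, PySem.Dict.insert_insert_self, hf]

-- Under Pre_, the enumerated loop data (index value, arr[i]) is exactly zip index_array arr.
theorem enumerate_map_eq_zip (arr index_array : List Int)
    (h : index_array.length ≤ arr.length) :
    (PySem.List.enumerate index_array 0).map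
        (fun p => (p.2, (PySem.List.pyGet? arr p.1).getD 0))
      = index_array.zip arr := by
  apply List.ext_getElem
  · simp [PySem.List.length_enumerate, Nat.min_eq_left h]
  · intro k h1 h2
    have hk : k < index_array.length := by
      simpa [PySem.List.length_enumerate] using h1
    have hka : k < arr.length := lt_of_lt_of_le hk h
    simp [PySem.List.getElem_enumerate, hka]

theorem sep_spec_aux (arr index_array : List Int)
    (h : index_array.length ≤ arr.length) :
    separate_array_by_index arr index_array = separate_array_by_index_alt arr index_array := by
  classical
  unfold separate_array_by_index separate_array_by_index_alt
  have hfoldfun : sepStepA arr = fun d p => PySem.Dict.modify d p.2 [] (fun l => l ++ [(PySem.List.pyGet? arr p.1).getD 0]) := by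
    funext d p; exact sepStepA_eq_modify arr d p
  rw [hfoldfun]
  -- rewrite the fold over enumerate as a fold over pairs
  have hfold :
      (PySem.List.enumerate index_array 0).foldl
          (fun d p => PySem.Dict.modify d p.2 [] (fun l => l ++ [(PySem.List.pyGet? arr p.1).getD 0]))
          PySem.Dict.empty
        = (index_array.zip arr).foldl (fun d q => PySem.Dict.modify d q.1 [] (fun l => l ++ [q.2])) PySem.Dict.empty := by
    rw [← enumerate_map_eq_zip arr index_array h, List.foldl_map]
  rw [hfold]
  set D := (index_array.zip arr).foldl (fun d q => PySem.Dict.modify d q.1 [] (fun l => l ++ [q.2])) PySem.Dict.empty with hD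
  have hnd : D.keys.Nodup := by
    rw [hD]
    exact PySem.Dict.nodup_keys_foldl_modify_key (index_array.zip arr) Prod.fst [] (fun d q l => l ++ [q.2]) PySem.Dict.empty (by simp)
  have hkeys : D.keys = PySem.Set.ofList ((index_array.zip arr).map (·.1)) := by
    rw [hD, PySem.Dict.keys_foldl_modify_key]
    simp [PySem.Dict.keys_empty, PySem.Set.update_nil_left]
  have hget : ∀ k, D.getD k [] = ((index_array.zip arr).filter (fun p => p.1 == k)).map (·.2) := by
    intro k
    rw [hD, PySem.Dict.getD_foldl_modify_append]
    simp [PySem.Dict.getD_empty]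
  rw [PySem.Dict.values_eq_map_keys D hnd [], hkeys]
  simp only [PySem.List.dedup_eq_ofList]
  exact List.map_congr_left (fun k _ => hget k)

-- ===== VERDICT (by name: the statement is the Claim_ definition above) =====
theorem separate_array_by_index_spec : Claim_equal_separate_array_by_index := by
  intro arr index_array _ hpre
  exact sep_spec_aux arr index_array hpre
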